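-- pv_equiv track=rewrite | github.com/hsliuping/TradingAgents-CN | tradingagents/tools/mcp/loader.py | _group_tool_ids
-- ===== SOURCE A (Python) =====
-- from typing import Any, Callable, Dict, Iterable, List, Optional, TYPE_CHECKING
--
-- def _group_tool_ids(selected_tool_ids: List[str]) -> Dict[str, List[str]]:
--     server_tools_map: Dict[str, List[str]] = {}
--     for tool_id in selected_tool_ids:
--         if ":" not in tool_id:
--             continue
--         server_name, tool_name = tool_id.split(":", 1)
--         server_tools_map.setdefault(server_name, []).append(tool_name)
--     return server_tools_map
-- ===== SOURCE B (Python) =====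
-- from typing import Dict, List
--
-- def _group_tool_ids(selected_tool_ids: List[str]) -> Dict[str, List[str]]:
--     pairs = [tuple(tid.split(":", 1)) for tid in selected_tool_ids if ":" in tid]
--     servers = list(dict.fromkeys(s for s, _ in pairs))
--     return {s: [t for p, t in pairs if p == s] for s in servers}
-- ===== Notes on version B (the rewrite author's own statement) =====
-- stated objective: alternative
-- what changed: Replaces A's single-pass loop that mutates a dict via setdefault+append with a dict-free three-step pipeline: split the ids once into (server, tool) pairs, dedup the server names in first-seen order, then build each server's tool list by a per-server comprehension scan over the pairs.
import Mathlib
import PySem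

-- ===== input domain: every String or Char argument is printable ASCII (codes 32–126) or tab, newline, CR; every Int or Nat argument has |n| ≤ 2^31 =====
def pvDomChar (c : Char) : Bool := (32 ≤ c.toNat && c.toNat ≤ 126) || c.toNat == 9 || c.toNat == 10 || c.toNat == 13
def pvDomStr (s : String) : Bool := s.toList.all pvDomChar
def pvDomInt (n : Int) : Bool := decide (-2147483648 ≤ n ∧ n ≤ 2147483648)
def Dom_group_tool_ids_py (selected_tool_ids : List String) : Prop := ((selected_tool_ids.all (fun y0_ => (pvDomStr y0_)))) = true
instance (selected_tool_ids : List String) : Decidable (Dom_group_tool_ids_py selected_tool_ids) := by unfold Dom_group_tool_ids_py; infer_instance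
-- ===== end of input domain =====

-- B replaces A's single-pass mutating-dict loop by a dict-free three-step decomposition
-- (split into pairs, dedup server names in first-seen order, gather each server's tools by
-- a per-server scan); same return value, no speed claim.

-- ===== PORT A =====
-- loop body of A: skip ids without ':', else split once and append the tool name to the
-- server's list (setdefault+append ≡ Dict.modify with default [], position preserved)
def pvAStep (d : PySem.Dict String (List String)) (tool_id : String) :
    PySem.Dict String (List String) :=
  if PySem.Str.isIn ":" tool_id then
    match PySem.Str.splitMax? tool_id ":" 1 with
    | some [server_name, tool_name] => d.modify server_name [] (fun ts => ts ++ [tool_name])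
    | _ => d
  else d

def group_tool_ids_py (selected_tool_ids : List String) : List (String × List String) :=
  (selected_tool_ids.foldl pvAStep PySem.Dict.empty).items

-- ===== PORT B =====
-- '(tuple(tid.split(":", 1)) for tid in … if ":" in tid)' — one id's contribution to `pairs`
def pvSplitPair (tid : String) : Option (String × String) :=
  if PySem.Str.isIn ":" tid then
    match PySem.Str.splitMax? tid ":" 1 with
    | some [s, t] => some (s, t)
    | _ => none
  else none

def group_tool_ids_py_alt (selected_tool_ids : List String) : List (String × List String) :=
  let pairs := selected_tool_ids.filterMap pvSplitPair
  let servers := PySem.List.dedup (pairs.map (fun p => p.1))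
  servers.map (fun s => (s, (pairs.filter (fun p => p.1 == s)).map (fun p => p.2)))

-- ===== PRECONDITION & SPEC =====
def Spec_group_tool_ids_py (selected_tool_ids : List String) (out : List (String × List String)) : Prop := out = group_tool_ids_py_alt selected_tool_ids
instance (selected_tool_ids : List String) (out : List (String × List String)) : Decidable (Spec_group_tool_ids_py selected_tool_ids out) := by unfold Spec_group_tool_ids_py; infer_instance

-- ===== CLAIM (what is proved, stated in full; the proofs are below) =====
def Claim_equal_group_tool_ids_py : Prop := ∀ (selected_tool_ids : List String), Dom_group_tool_ids_py selected_tool_ids → Spec_group_tool_ids_py selected_tool_ids (group_tool_ids_py selected_tool_ids)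

-- ===== LEMMAS AND PROOFS =====

-- A's fold over the raw ids equals the grouping fold over the (server, tool) pairs
lemma pvFoldA_eq (ids : List String) :
    ∀ d, ids.foldl pvAStep d
      = (ids.filterMap pvSplitPair).foldl
          (fun d p => d.modify p.1 [] (fun ts => ts ++ [p.2])) d := by
  induction ids with
  | nil => intro d; rfl
  | cons tid rest ih =>
    intro d
    rw [List.foldl_cons, List.filterMap_cons]
    by_cases h : PySem.Str.isIn ":" tid
    · have h' : PySem.Chars.isIn [':'] tid.toList = true := by
        simpa [PySem.Str.isIn] using h
      rcases hs : PySem.Str.splitMax? tid ":" 1 with _ | ⟨_ | ⟨s, _ | ⟨t, _ | _⟩⟩⟩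
      case pos.some.cons.cons.nil =>
        have hA : pvAStep d tid = d.modify s [] (fun ts => ts ++ [t]) := by
          simp [pvAStep, h', hs]
        have hB : pvSplitPair tid = some (s, t) := by
          simp [pvSplitPair, h', hs]
        rw [hA, hB, List.foldl_cons]; exact ih _
      all_goals
        have hA : pvAStep d tid = d := by simp [pvAStep, h', hs]
        have hB : pvSplitPair tid = none := by simp [pvSplitPair, h', hs]
        rw [hA, hB]; exact ih _
    · have h' : PySem.Chars.isIn [':'] tid.toList = false := by
        simpa [PySem.Str.isIn] using eq_false_of_ne_true h
      have hA : pvAStep d tid = d := by simp [pvAStep, h']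
      have hB : pvSplitPair tid = none := by simp [pvSplitPair, h']
      rw [hA, hB]; exact ih _

theorem group_tool_ids_py_spec : Claim_equal_group_tool_ids_py := by
  intro ids _
  unfold Spec_group_tool_ids_py group_tool_ids_py group_tool_ids_py_alt
  rw [pvFoldA_eq]
  set ps := ids.filterMap pvSplitPair with hps
  set D := ps.foldl (fun d p => d.modify p.1 [] (fun ts => ts ++ [p.2]))
      (PySem.Dict.empty : PySem.Dict String (List String)) with hD
  have hkeys : D.keys = PySem.List.dedup (ps.map (fun p => p.1)) := by
    rw [hD, PySem.Dict.keys_foldl_modify_key]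
    simp [PySem.Set.update, PySem.Set.ofList, PySem.List.dedup_eq_ofList]
  have hnd : D.keys.Nodup := by
    rw [hkeys]; exact PySem.List.nodup_dedup _
  have hgetD : ∀ s, D.getD s [] = (ps.filter (fun p => p.1 == s)).map (fun p => p.2) := by
    intro s
    rw [hD, PySem.Dict.getD_foldl_modify_append]
    simp
  rw [PySem.Dict.items_eq_map_keys D hnd [], hkeys]
  exact List.map_congr_left (fun s _ => by rw [hgetD s])
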